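-- pv_equiv track=rewrite | github.com/GusRondello/project-inventory-report | inventory_report/reports/complete_report.py | _quantity_products
-- ===== SOURCE A (Python) =====
-- from collections import Counter
--
-- def _quantity_products(list, filter):
--     text = """"""
--     companies = [item[filter] for item in list]
--     count = Counter(companies).items()
--
--     for company in count:
--         name, quantity = company
--         text += f"- {name}: {quantity}\n"
--
--     return text
-- ===== SOURCE B (Python) =====
-- def _quantity_products(list, filter):
--     keys = [item[filter] for item in list]
--     text = ""
--     while keys:
--         name = keys[0]
--         rest = [k for k in keys[1:] if k != name]
--         text += f"- {name}: {len(keys) - len(rest)}\n"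
--         keys = rest
--     return text
-- ===== Notes on version B (the rewrite author's own statement) =====
-- stated objective: alternative
-- what changed: Replaces the Counter frequency-table pass with a count-and-remove loop: repeatedly take the first remaining key, obtain its count as the length drop after filtering it out, and shrink the worklist, so no counting dictionary or per-key membership structure is ever built.
import Mathlib
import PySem

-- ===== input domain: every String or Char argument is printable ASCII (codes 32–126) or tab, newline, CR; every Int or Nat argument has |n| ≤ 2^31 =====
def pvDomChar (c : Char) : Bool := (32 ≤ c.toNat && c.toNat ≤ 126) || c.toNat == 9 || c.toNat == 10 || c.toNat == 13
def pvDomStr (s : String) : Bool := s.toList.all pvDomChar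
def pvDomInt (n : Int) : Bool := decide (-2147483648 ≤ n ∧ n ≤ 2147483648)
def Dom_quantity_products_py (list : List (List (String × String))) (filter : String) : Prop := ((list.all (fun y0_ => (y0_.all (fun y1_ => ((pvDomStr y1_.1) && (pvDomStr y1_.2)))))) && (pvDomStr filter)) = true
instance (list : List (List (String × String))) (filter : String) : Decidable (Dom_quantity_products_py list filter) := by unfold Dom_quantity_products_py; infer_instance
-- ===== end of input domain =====

-- B replaces A's Counter table with a count-and-remove worklist loop (counts come from the length drop when the processed key is filtered out); alternative decomposition, not faster. No mutation of the arguments.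


-- ===== PORT A =====
-- item[filter] is a dict lookup; Pre_ guarantees the key is present, so the .getD "" default is never used.
def quantity_products_py (list : List (List (String × String))) (filter : String) : String :=
  let companies := list.map (fun item => ((PySem.Dict.mk item).get? filter).getD "")
  let count := (PySem.Dict.counter companies).items
  count.foldl (fun text company =>
    text ++ "- " ++ company.1 ++ ": " ++ PySem.Int.toStr company.2 ++ "\n") ""

-- ===== PORT B =====
-- The while loop of Source B as well-founded recursion on the shrinking worklist.
def pvLoopB : List String → String → String
  | [], text => text
  | name :: ks, text =>
    pvLoopB (ks.filter (fun k => k != name))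
      (text ++ "- " ++ name ++ ": " ++
        PySem.Int.toStr (((name :: ks).length : Int) - ((ks.filter (fun k => k != name)).length : Int)) ++ "\n")
termination_by keys _ => keys.length
decreasing_by
  simp only [List.length_cons, List.length_unattach]
  exact Nat.lt_succ_of_le (le_trans (List.length_filter_le _ _) (le_of_eq List.length_attach))

def quantity_products_py_alt (list : List (List (String × String))) (filter : String) : String :=
  let keys := list.map (fun item => ((PySem.Dict.mk item).get? filter).getD "")
  pvLoopB keys ""

-- ===== PRECONDITION & SPEC =====
-- Pre_ excludes exactly the inputs where item[filter] raises KeyError (some item lacks the key).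
def Pre_quantity_products_py (list : List (List (String × String))) (filter : String) : Prop :=
  list.all (fun item => (PySem.Dict.mk item).contains filter) = true
instance (list : List (List (String × String))) (filter : String) : Decidable (Pre_quantity_products_py list filter) := by unfold Pre_quantity_products_py; infer_instance
def pvWitness_quantity_products_py : (List (List (String × String))) × String :=
  ([[("c", "x")], [("c", "y")], [("c", "x")]], "c")
def Spec_quantity_products_py (list : List (List (String × String))) (filter : String) (out : String) : Prop := out = quantity_products_py_alt list filter
instance (list : List (List (String × String))) (filter : String) (out : String) : Decidable (Spec_quantity_products_py list filter out) := by unfold Spec_quantity_products_py; infer_instance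

-- ===== CLAIM =====
def Claim_equal_quantity_products_py : Prop := ∀ (list : List (List (String × String))) (filter : String), Dom_quantity_products_py list filter → Pre_quantity_products_py list filter → Spec_quantity_products_py list filter (quantity_products_py list filter)

-- ===== LEMMAS AND PROOFS =====

-- foldl of Set.add ignores occurrences of an element already in the accumulator
lemma pv_foldl_add_filter (k : String) : ∀ (xs : List String) (s : PySem.Set String), k ∈ s →
    List.foldl PySem.Set.add s (xs.filter (fun x => x != k)) = List.foldl PySem.Set.add s xs := by
  intro xs
  induction xs with
  | nil => intro s _; rfl
  | cons x xs ih =>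
    intro s hk
    by_cases hx : x = k
    · subst hx
      have hadd : PySem.Set.add s x = s := by
        simp [PySem.Set.add, PySem.Set.contains, hk]
      simp only [List.filter_cons, bne_self_eq_false, Bool.false_eq_true, if_false,
        List.foldl_cons, hadd]
      exact ih s hk
    · rw [List.filter_cons_of_pos (by simp [hx]), List.foldl_cons, List.foldl_cons]
      exact ih (PySem.Set.add s x) ((PySem.Set.mem_add s x k).mpr (Or.inl hk))

-- foldl of Set.add over elements all ≠ a commutes with a leading a
lemma pv_foldl_add_shift (a : String) : ∀ (xs : List String) (s : PySem.Set String),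
    (∀ x ∈ xs, x ≠ a) →
    List.foldl PySem.Set.add (a :: s) xs = a :: List.foldl PySem.Set.add s xs := by
  intro xs
  induction xs with
  | nil => intro s _; rfl
  | cons x xs ih =>
    intro s h
    have hxa : x ≠ a := h x (by simp)
    have hc : List.contains (a :: s) x = List.contains s x := by
      simp [List.contains_iff_mem, hxa]
    have hadd : PySem.Set.add (a :: s) x = a :: PySem.Set.add s x := by
      simp only [PySem.Set.add, PySem.Set.contains, hc]
      split <;> rfl
    simp only [List.foldl_cons, hadd]
    exact ih _ (fun y hy => h y (by simp [hy]))

-- first-seen dedup recursion: ofList (k :: ks) = k :: ofList (ks minus k)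
lemma pv_ofList_cons (k : String) (ks : List String) :
    PySem.Set.ofList (k :: ks) = k :: PySem.Set.ofList (ks.filter (fun x => x != k)) := by
  have h1 : PySem.Set.ofList (k :: ks) = List.foldl PySem.Set.add [k] ks := by
    simp [PySem.Set.ofList, PySem.Set.add, PySem.Set.empty, PySem.Set.contains]
  rw [h1, ← pv_foldl_add_filter k ks [k] (by simp)]
  rw [pv_foldl_add_shift k _ ([] : PySem.Set String)
    (fun x hx => by simpa using (List.of_mem_filter hx))]
  rfl

lemma pv_count_len (k : String) (ks : List String) :
    ks.count k + (ks.filter (fun x => x != k)).length = ks.length := by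
  induction ks with
  | nil => rfl
  | cons x xs ih =>
    by_cases hx : x = k
    · subst hx; simp [List.count_cons, List.filter_cons]; omega
    · simp [List.count_cons, List.filter_cons, hx, bne_iff_ne]
      omega

-- main loop invariant: A's fold over the deduped count table equals B's count-and-remove loop
lemma pv_main : ∀ (n : ℕ) (l : List String), l.length ≤ n → ∀ (text : String),
    ((PySem.Set.ofList l).map (fun s => (s, (l.count s : Int)))).foldl
      (fun text company => text ++ "- " ++ company.1 ++ ": " ++ PySem.Int.toStr company.2 ++ "\n")
      text = pvLoopB l text := by
  intro n
  induction n with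
  | zero =>
    intro l hl text
    have : l = [] := List.length_eq_zero_iff.mp (Nat.le_zero.mp hl)
    subst this
    simp [pvLoopB, PySem.Set.ofList, PySem.Set.empty]
  | succ m ih =>
    intro l hl text
    match l with
    | [] => simp [pvLoopB, PySem.Set.ofList, PySem.Set.empty]
    | k :: ks =>
      have hrestlen : (ks.filter (fun x => x != k)).length ≤ m := by
        have := List.length_filter_le (fun x => x != k) ks
        simp only [List.length_cons] at hl
        omega
      rw [pv_ofList_cons]
      simp only [List.map_cons, List.foldl_cons]
      have hmap : (PySem.Set.ofList (ks.filter (fun x => x != k))).map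
            (fun s => (s, ((k :: ks).count s : Int)))
          = (PySem.Set.ofList (ks.filter (fun x => x != k))).map
            (fun s => (s, ((ks.filter (fun x => x != k)).count s : Int))) := by
        apply List.map_congr_left
        intro s hs
        have hs' : s ∈ ks.filter (fun x => x != k) := (PySem.Set.mem_ofList _ s).mp hs
        have hsk : s ≠ k := by simpa using (List.of_mem_filter hs')
        have h1 : (k :: ks).count s = ks.count s := by simp [List.count_cons, Ne.symm hsk]
        have h2 : (ks.filter (fun x => x != k)).count s = ks.count s := by
          rw [List.count_filter]; simp [hsk]
        rw [h1, h2]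
      have hcnt : ((k :: ks).count k : Int)
          = ((k :: ks).length : Int) - ((ks.filter (fun x => x != k)).length : Int) := by
        have h := pv_count_len k ks
        simp only [List.count_cons_self, List.length_cons]
        push_cast
        omega
      rw [hmap, hcnt, ih _ hrestlen]
      rw [pvLoopB]

-- ===== VERDICT =====
theorem quantity_products_py_spec : Claim_equal_quantity_products_py := by
  intro list filter _ _
  unfold Spec_quantity_products_py quantity_products_py quantity_products_py_alt
  simp only [PySem.Dict.items_counter]
  exact pv_main _ _ (le_refl _) ""
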